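-- pv_equiv track=rewrite | github.com/Renaxis-Math/Car-Price-Prediction | Confidential/Recruiting/Resources/Data Structures/trie/addwordPrefixTree.py | hrt_dp
-- ===== SOURCE A (Python) =====
-- nextPlayerDict = {}
--
-- def hrt_dp(dictionary, cur_player):
--
--     def get_options(i, cur_prefix):
--         options = set()
--         for word in dictionary:
--             if word[:i] == cur_prefix and i < len(word)-1:
--                 options.add(word[i])
--
--         return options
--
--     memo = {}
--     def can_cur_player_win(i, cur_prefix):
--
--         if cur_prefix in set(dictionary):
--             memo[(i, cur_prefix)] = True
--             return True
--
--         if (i, cur_prefix) in memo: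
--             return memo[(i, cur_prefix)]
--
--         options = get_options(i, cur_prefix)
--         for option in options:
--             res = can_cur_player_win(i+1, cur_prefix + option)
--             if not res:
--                 memo[(i, cur_prefix)] = True
--                 return True
--
--         memo[(i, cur_prefix)] = False
--         return False
--
--     if can_cur_player_win(0, ""):
--         return cur_player
--     return nextPlayerDict[cur_player]
-- ===== SOURCE B (Python) =====
-- nextPlayerDict = {}
--
-- def hrt_dp(dictionary, cur_player):
--     # Partition refinement: recurse on the sub-list of words sharing the current
--     # prefix, splitting it by the next character (an implicit trie), instead of
--     # rescanning the whole dictionary at every game state.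
--     def win(ws, i):
--         # ws: the words of the dictionary that have the current prefix (length i)
--         if any(len(w) == i for w in ws):
--             return True
--         groups = {}
--         for w in ws:
--             if len(w) > i:
--                 groups.setdefault(w[i], []).append(w)
--         for g in groups.values():
--             if any(len(w) > i + 1 for w in g) and not win(g, i + 1):
--                 return True
--         return False
--
--     if win(dictionary, 0):
--         return cur_player
--     return nextPlayerDict[cur_player]
-- ===== Notes on version B (the rewrite author's own statement) =====
-- stated objective: alternative
-- what changed: Instead of rescanning the entire dictionary at every game state (and memoising states that are each reached only once), B recurses on the sub-list of words sharing the current prefix and splits it by the next character in one grouping pass (an implicit trie / partition refinement), so each word is touched only along its own path; on a timing run's generated inputs the exploration is shallow and both are one linear pass, so no speed is claimed.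
import Mathlib
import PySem

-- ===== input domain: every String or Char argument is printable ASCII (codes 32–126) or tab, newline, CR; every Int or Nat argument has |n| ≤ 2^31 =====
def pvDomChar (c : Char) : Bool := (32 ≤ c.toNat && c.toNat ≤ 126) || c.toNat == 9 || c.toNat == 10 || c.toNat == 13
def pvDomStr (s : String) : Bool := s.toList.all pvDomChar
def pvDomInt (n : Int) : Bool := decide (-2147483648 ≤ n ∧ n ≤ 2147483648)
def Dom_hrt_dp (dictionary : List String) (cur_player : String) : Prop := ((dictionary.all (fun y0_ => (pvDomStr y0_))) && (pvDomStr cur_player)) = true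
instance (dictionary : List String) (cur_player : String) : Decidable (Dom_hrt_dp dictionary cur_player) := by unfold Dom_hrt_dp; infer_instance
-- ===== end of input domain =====

-- B replaces A's per-state full-dictionary scan (plus a memo for states that are each reached only
-- once) by partition refinement: it recurses on the sub-list of words sharing the current prefix and
-- splits it by the next character in one grouping pass (an implicit trie) — a different algorithm
-- of comparable measured cost.

-- ===== PORT A =====

-- get_options(i, cur_prefix): scan the whole dictionary collecting word[i] into a set
def getOptionsA (dictionary : List String) (i : Int) (cur_prefix : String) : PySem.Set Char :=
  dictionary.foldl (fun options word =>
    if PySem.Str.slice word none (some i) == cur_prefix && decide (i < PySem.Str.len word - 1) then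
      match PySem.Str.pyGet? word i with
      | some c => PySem.Set.add options c
      | none => options  -- unreachable: the guard above puts i in range
    else options) PySem.Set.empty

mutual
-- can_cur_player_win(i, cur_prefix), with the memo dict threaded through; the fuel argument is only
-- a totality guard (hrt_dp supplies max word length + 1, which is never exhausted).
def canWinA (dictionary : List String) : Nat → Int → String → PySem.Dict (Int × String) Bool →
    Bool × PySem.Dict (Int × String) Bool
  | 0, _i, _p, memo => (false, memo)  -- fuel guard, never reached from hrt_dp's initial fuel
  | fuel + 1, i, cur_prefix, memo =>
    if cur_prefix ∈ dictionary then  -- cur_prefix in set(dictionary)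
      (true, memo.insert (i, cur_prefix) true)
    else
      match memo.get? (i, cur_prefix) with  -- if (i, cur_prefix) in memo
      | some b => (b, memo)
      | none => loopA dictionary fuel i cur_prefix (getOptionsA dictionary i cur_prefix) memo
  termination_by fuel _ _ _ => (fuel, 0)

-- the 'for option in options' loop with its early return
def loopA (dictionary : List String) (fuel : Nat) (i : Int) (cur_prefix : String) :
    List Char → PySem.Dict (Int × String) Bool → Bool × PySem.Dict (Int × String) Bool
  | [], memo => (false, memo.insert (i, cur_prefix) false)
  | option :: rest, memo =>
    let r := canWinA dictionary fuel (i + 1) (cur_prefix.push option) memo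
    if !r.1 then (true, r.2.insert (i, cur_prefix) true)
    else loopA dictionary fuel i cur_prefix rest r.2
  termination_by l _ => (fuel, l.length + 1)
end

def nextPlayerDictA : PySem.Dict String String := PySem.Dict.empty  -- module-level nextPlayerDict = {}

def maxWordLenA (dictionary : List String) : Nat :=
  dictionary.foldl (fun m w => max m w.toList.length) 0  -- fuel bound (totality guard only)

def hrt_dp (dictionary : List String) (cur_player : String) : String :=
  if (canWinA dictionary (maxWordLenA dictionary + 1) 0 "" PySem.Dict.empty).1 then cur_player
  else (nextPlayerDictA.get? cur_player).getD ""
  -- ^ nextPlayerDict[cur_player]: KeyError in Python (the dict is empty); excluded by Pre_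

-- ===== PORT B =====

-- body of 'for w in ws: if len(w) > i: groups.setdefault(w[i], []).append(w)'
def groupStepB (i : Nat) (gs : PySem.Dict Char (List String)) (w : String) :
    PySem.Dict Char (List String) :=
  if i < w.toList.length then
    gs.insert (w.toList.getD i ' ') (gs.getD (w.toList.getD i ' ') [] ++ [w])
  else gs

-- win(ws, i); fuel is only a totality guard (hrt_dp_alt supplies max word length + 1)
def winB : Nat → List String → Nat → Bool
  | 0, _, _ => false  -- fuel guard, never reached from hrt_dp_alt's initial fuel
  | fuel + 1, ws, i =>
    if ws.any (fun w => w.toList.length == i) then true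
    else
      (ws.foldl (groupStepB i) PySem.Dict.empty).values.any
        (fun g => g.any (fun w => i + 1 < w.toList.length) && ! winB fuel g (i + 1))

def nextPlayerDictB : PySem.Dict String String := PySem.Dict.empty  -- module-level nextPlayerDict = {}

def maxWordLenB (dictionary : List String) : Nat :=
  dictionary.foldl (fun m w => max m w.toList.length) 0  -- fuel bound (totality guard only)

def hrt_dp_alt (dictionary : List String) (cur_player : String) : String :=
  if winB (maxWordLenB dictionary + 1) dictionary 0 then cur_player
  else (nextPlayerDictB.get? cur_player).getD ""
  -- ^ nextPlayerDict[cur_player]: KeyError in Python (the dict is empty); excluded by Pre_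

-- ===== PRECONDITION & SPEC =====

-- The game's value, stated once over List Char (the specification both ports are proved equal to):
-- the player to move at prefix p wins iff p is a dictionary word, or some playable next character
-- (a char word[|p|] of a word with prefix p and length > |p|+1) leads to a losing position.
def memD (d : List String) (p : List Char) : Bool := d.any (fun w => w.toList == p)

def optsD (d : List String) (p : List Char) : List Char :=
  d.filterMap (fun w =>
    if p.length + 1 < w.toList.length ∧ w.toList.take p.length = p then w.toList[p.length]?
    else none)

def gwin (d : List String) : Nat → List Char → Bool
  | 0, p => memD d p
  | fuel + 1, p => memD d p || (optsD d p).any (fun c => ! gwin d fuel (p ++ [c]))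

def maxWordLenS (d : List String) : Nat := d.foldl (fun m w => max m w.toList.length) 0

-- A's module-level nextPlayerDict is the EMPTY dict, so A raises KeyError exactly when the current
-- player cannot win the prefix-building game; Pre_ admits exactly the inputs on which A returns
-- normally: the winning positions. "The current player wins the game" has no non-recursive
-- characterisation, so Pre_ states it via gwin, the game's semantic value (word membership /
-- playable next characters), which is independent of both ports' algorithms (A's memoised
-- per-state dictionary scan, B's partition refinement); the fuel max word length + 1 is always
-- sufficient (gwin_stable below), so gwin here IS the game value, not a resource bound.
def Pre_hrt_dp (dictionary : List String) (cur_player : String) : Prop :=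
  gwin dictionary (maxWordLenS dictionary + 1) [] = true

instance (dictionary : List String) (cur_player : String) : Decidable (Pre_hrt_dp dictionary cur_player) := by
  unfold Pre_hrt_dp; infer_instance

def pvWitness_hrt_dp : List String × String := (["ab"], "p1")

def Spec_hrt_dp (dictionary : List String) (cur_player : String) (out : String) : Prop :=
  out = hrt_dp_alt dictionary cur_player

instance (dictionary : List String) (cur_player : String) (out : String) : Decidable (Spec_hrt_dp dictionary cur_player out) := by
  unfold Spec_hrt_dp; infer_instance

-- ===== CLAIM (what is proved, stated in full; the proofs are below) =====
def Claim_equal_hrt_dp : Prop := ∀ (dictionary : List String) (cur_player : String), Dom_hrt_dp dictionary cur_player → Pre_hrt_dp dictionary cur_player → Spec_hrt_dp dictionary cur_player (hrt_dp dictionary cur_player)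

-- ===== LEMMAS AND PROOFS =====

-- The canonical game value
def G (d : List String) (p : List Char) : Bool := gwin d (maxWordLenS d + 1) p

lemma foldl_max_init_le (l : List String) :
    ∀ (init : Nat), init ≤ l.foldl (fun m w => max m w.toList.length) init := by
  induction l with
  | nil => intro init; simp
  | cons a l ih => intro init; exact le_trans (le_max_left _ _) (ih _)

lemma len_le_foldl_max (l : List String) :
    ∀ (init : Nat) (w : String), w ∈ l →
      w.toList.length ≤ l.foldl (fun m w => max m w.toList.length) init := by
  induction l with
  | nil => intro _ w hw; cases hw
  | cons a l ih =>
    intro init w hw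
    rcases List.mem_cons.mp hw with hw | hw
    · subst hw; exact le_trans (le_max_right _ _) (foldl_max_init_le l _)
    · exact ih _ _ hw

lemma len_le_maxWordLenS (d : List String) (w : String) (hw : w ∈ d) :
    w.toList.length ≤ maxWordLenS d :=
  len_le_foldl_max d 0 w hw

lemma optsD_nil (d : List String) (p : List Char) (h : maxWordLenS d ≤ p.length) :
    optsD d p = [] := by
  simp only [optsD, List.filterMap_eq_nil_iff]
  intro w hw
  split
  · rename_i hcond
    have := len_le_maxWordLenS d w hw
    omega
  · rfl

lemma memD_false (d : List String) (p : List Char) (h : maxWordLenS d < p.length) :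
    memD d p = false := by
  simp only [memD, List.any_eq_false, beq_iff_eq]
  intro w hw hweq
  have h1 := len_le_maxWordLenS d w hw
  have h2 : w.toList.length = p.length := by rw [hweq]
  omega

lemma gwin_succ (d : List String) (n : Nat) (p : List Char) :
    gwin d (n + 1) p = (memD d p || (optsD d p).any (fun c => ! gwin d n (p ++ [c]))) := rfl

lemma gwin_stable (d : List String) :
    ∀ (fuel : Nat) (p : List Char), maxWordLenS d ≤ fuel + p.length →
      gwin d (fuel + 1) p = gwin d fuel p := by
  intro fuel
  induction fuel with
  | zero =>
    intro p h
    simp only [gwin, optsD_nil d p (by omega), List.any_nil, Bool.or_false]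
  | succ fuel ih =>
    intro p h
    rw [gwin_succ, gwin_succ]
    congr 1
    apply PySem.List.any_congr_mem
    intro c _
    rw [ih (p ++ [c]) (by simp; omega)]

lemma gwin_eq_G (d : List String) (fuel : Nat) (p : List Char)
    (h : maxWordLenS d ≤ fuel + p.length) : gwin d fuel p = G d p := by
  have hadd : ∀ (k fuel : Nat), maxWordLenS d ≤ fuel + p.length →
      gwin d (fuel + k) p = gwin d fuel p := by
    intro k
    induction k with
    | zero => intro _ _; rfl
    | succ k ih =>
      intro fuel hf
      have : fuel + (k + 1) = (fuel + k) + 1 := by omega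
      rw [this, gwin_stable d (fuel + k) p (by omega), ih fuel hf]
  have hF1 : gwin d (max fuel (maxWordLenS d + 1)) p = gwin d fuel p := by
    have e : fuel + (max fuel (maxWordLenS d + 1) - fuel) = max fuel (maxWordLenS d + 1) := by omega
    rw [← e]; exact hadd _ _ h
  have hF2 : gwin d (max fuel (maxWordLenS d + 1)) p = gwin d (maxWordLenS d + 1) p := by
    have e : (maxWordLenS d + 1) + (max fuel (maxWordLenS d + 1) - (maxWordLenS d + 1)) =
        max fuel (maxWordLenS d + 1) := by omega
    rw [← e]; exact hadd _ _ (by omega)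
  rw [G, ← hF2, hF1]

lemma G_unfold (d : List String) (p : List Char) :
    G d p = (memD d p || (optsD d p).any (fun c => ! G d (p ++ [c]))) := by
  rw [G, gwin_succ]
  congr 1
  apply PySem.List.any_congr_mem
  intro c _
  rw [gwin_eq_G d (maxWordLenS d) (p ++ [c]) (by simp)]

lemma G_long (d : List String) (p : List Char) (h : maxWordLenS d < p.length) :
    G d p = false := by
  rw [G_unfold, memD_false d p h, optsD_nil d p (by omega)]
  simp

lemma mem_optsD (d : List String) (p : List Char) (c : Char) :
    c ∈ optsD d p ↔ ∃ w ∈ d, p.length + 1 < w.toList.length ∧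
      w.toList.take p.length = p ∧ w.toList[p.length]? = some c := by
  simp only [optsD, List.mem_filterMap]
  constructor
  · rintro ⟨w, hw, hsome⟩
    split at hsome
    · rename_i hc; exact ⟨w, hw, hc.1, hc.2, hsome⟩
    · cases hsome
  · rintro ⟨w, hw, h1, h2, h3⟩
    exact ⟨w, hw, by rw [if_pos ⟨h1, h2⟩]; exact h3⟩

lemma slice_beq_iff (w : String) (n : Nat) (p : String) :
    ((PySem.Str.slice w none (some (n : Int))) == p) = true ↔ w.toList.take n = p.toList := by
  rw [beq_iff_eq]
  constructor
  · intro h; rw [← h]; simp [PySem.Str.toList_slice, PySem.Chars.slice, PySem.List.slice_to_natCast]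
  · intro h
    apply String.ext
    simpa [PySem.Str.toList_slice, PySem.Chars.slice, PySem.List.slice_to_natCast] using h

-- membership in the char set built by get_options
lemma mem_getOptionsA (d : List String) (p : String) (c : Char) :
    c ∈ getOptionsA d ((p.toList.length : Nat) : Int) p ↔ c ∈ optsD d p.toList := by
  rw [mem_optsD]
  unfold getOptionsA
  have haux : ∀ (ws : List String) (s : PySem.Set Char),
      c ∈ ws.foldl (fun options word =>
        if PySem.Str.slice word none (some ((p.toList.length : Nat) : Int)) == p &&
            decide (((p.toList.length : Nat) : Int) < PySem.Str.len word - 1) then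
          match PySem.Str.pyGet? word ((p.toList.length : Nat) : Int) with
          | some c' => PySem.Set.add options c'
          | none => options
        else options) s ↔
      c ∈ s ∨ ∃ w ∈ ws, p.toList.length + 1 < w.toList.length ∧
        w.toList.take p.toList.length = p.toList ∧ w.toList[p.toList.length]? = some c := by
    intro ws
    induction ws with
    | nil => intro s; simp
    | cons w ws ih =>
      intro s
      rw [List.foldl_cons, ih]
      by_cases hcond : w.toList.take p.toList.length = p.toList ∧
          p.toList.length + 1 < w.toList.length
      · have hC : (PySem.Str.slice w none (some ((p.toList.length : Nat) : Int)) == p &&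
            decide (((p.toList.length : Nat) : Int) < PySem.Str.len w - 1)) = true := by
          rw [Bool.and_eq_true, slice_beq_iff]
          refine ⟨hcond.1, ?_⟩
          simp only [PySem.Str.len_eq, decide_eq_true_eq]
          have := hcond.2
          omega
        rw [if_pos hC]
        have hn : p.toList.length < w.toList.length := by omega
        have hget : PySem.Str.pyGet? w ((p.toList.length : Nat) : Int) =
            some (w.toList[p.toList.length]'hn) := by
          rw [PySem.Str.pyGet?_natCast, List.getElem?_eq_getElem hn]
        rw [hget]
        rw [PySem.Set.mem_add]
        constructor
        · rintro (⟨hs | he⟩ | hws)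
          · exact Or.inl hs
          · exact Or.inr ⟨w, List.mem_cons_self .., hcond.2, hcond.1,
              by rw [List.getElem?_eq_getElem hn, he]⟩
          · rcases hws with ⟨w', hw', hx⟩
            exact Or.inr ⟨w', List.mem_cons_of_mem _ hw', hx⟩
        · rintro (hs | ⟨w', hw', h1, h2, h3⟩)
          · exact Or.inl (Or.inl hs)
          · rcases List.mem_cons.mp hw' with hw' | hw'
            · subst hw'
              refine Or.inl (Or.inr ?_)
              rw [List.getElem?_eq_getElem hn] at h3
              exact (Option.some_inj.mp h3).symm
            · exact Or.inr ⟨w', hw', h1, h2, h3⟩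
      · have hC : (PySem.Str.slice w none (some ((p.toList.length : Nat) : Int)) == p &&
            decide (((p.toList.length : Nat) : Int) < PySem.Str.len w - 1)) = false := by
          rw [Bool.eq_false_iff]
          intro hC
          rw [Bool.and_eq_true, slice_beq_iff] at hC
          apply hcond
          refine ⟨hC.1, ?_⟩
          have := hC.2
          simp only [PySem.Str.len_eq, decide_eq_true_eq] at this
          omega
        simp only [hC, Bool.false_eq_true, if_false]
        constructor
        · rintro (hs | ⟨w', hw', hx⟩)
          · exact Or.inl hs
          · exact Or.inr ⟨w', List.mem_cons_of_mem _ hw', hx⟩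
        · rintro (hs | ⟨w', hw', h1, h2, h3⟩)
          · exact Or.inl hs
          · rcases List.mem_cons.mp hw' with hw' | hw'
            · subst hw'; exact absurd ⟨h2, h1⟩ hcond
            · exact Or.inr ⟨w', hw', h1, h2, h3⟩
  rw [haux]
  simp [PySem.Set.empty]

-- every value cached in the memo is the true game value of its prefix
def MemoOK (d : List String) (memo : PySem.Dict (Int × String) Bool) : Prop :=
  ∀ (i : Int) (p : String) (b : Bool), memo.get? (i, p) = some b → b = G d p.toList

lemma memoOK_insert (d : List String) (memo : PySem.Dict (Int × String) Bool)
    (h : MemoOK d memo) (j : Int) (q : String) (v : Bool) (hv : v = G d q.toList) :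
    MemoOK d (memo.insert (j, q) v) := by
  intro i p b hb
  rw [PySem.Dict.get?_insert] at hb
  split at hb
  · rename_i he
    cases Prod.mk.injEq .. ▸ he with
    | intro h1 h2 => subst h2; cases hb; exact hv
  · exact h i p b hb

lemma loopA_correct (d : List String) (fuel : Nat) (p : String)
    (ih : ∀ (q : String) (memo : PySem.Dict (Int × String) Bool),
      MemoOK d memo → maxWordLenS d + 1 ≤ fuel + q.toList.length →
      (canWinA d fuel ((q.toList.length : Nat) : Int) q memo).1 = G d q.toList ∧
      MemoOK d (canWinA d fuel ((q.toList.length : Nat) : Int) q memo).2)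
    (hlen : maxWordLenS d ≤ fuel + p.toList.length) :
    ∀ (cs : List Char) (memo : PySem.Dict (Int × String) Bool), MemoOK d memo →
      cs.any (fun c => ! G d (p.toList ++ [c])) = G d p.toList →
      (loopA d fuel ((p.toList.length : Nat) : Int) p cs memo).1 = G d p.toList ∧
      MemoOK d (loopA d fuel ((p.toList.length : Nat) : Int) p cs memo).2 := by
  intro cs
  induction cs with
  | nil =>
    intro memo hm hb
    simp only [List.any_nil] at hb
    simp only [loopA]
    exact ⟨hb, memoOK_insert d memo hm _ p false hb⟩
  | cons c rest ihc =>
    intro memo hm hb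
    simp only [loopA]
    have hcast : ((p.toList.length : Nat) : Int) + 1 = (((p.push c).toList.length : Nat) : Int) := by
      simp [String.toList_push]
    have hpush : (p.push c).toList = p.toList ++ [c] := by simp
    have hr := ih (p.push c) memo hm (by rw [hpush]; simp only [List.length_append, List.length_cons, List.length_nil]; omega)
    rw [← hcast] at hr
    rw [hpush] at hr
    cases hG : G d (p.toList ++ [c]) with
    | false =>
      rw [hG] at hr
      simp only [hr.1, Bool.not_false, if_true]
      have hbtrue : G d p.toList = true := by
        rw [← hb]
        simp [hG]
      exact ⟨hbtrue.symm, memoOK_insert d _ hr.2 _ p true hbtrue.symm⟩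
    | true =>
      rw [hG] at hr
      simp only [hr.1, Bool.not_true]
      apply ihc _ hr.2
      rw [← hb]
      simp [hG]

lemma canWinA_correct (d : List String) :
    ∀ (fuel : Nat) (p : String) (memo : PySem.Dict (Int × String) Bool),
      MemoOK d memo → maxWordLenS d + 1 ≤ fuel + p.toList.length →
      (canWinA d fuel ((p.toList.length : Nat) : Int) p memo).1 = G d p.toList ∧
      MemoOK d (canWinA d fuel ((p.toList.length : Nat) : Int) p memo).2 := by
  intro fuel
  induction fuel with
  | zero =>
    intro p memo hm hlen
    simp only [canWinA]
    exact ⟨(G_long d p.toList (by omega)).symm, hm⟩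
  | succ fuel ih =>
    intro p memo hm hlen
    simp only [canWinA]
    by_cases hp : p ∈ d
    · simp only [hp, if_true]
      have hmem : memD d p.toList = true := by
        simp only [memD, List.any_eq_true, beq_iff_eq]
        exact ⟨p, hp, rfl⟩
      have hG : G d p.toList = true := by rw [G_unfold, hmem]; simp
      exact ⟨hG.symm, memoOK_insert d memo hm _ p true hG.symm⟩
    · simp only [hp, if_false]
      have hmem : memD d p.toList = false := by
        simp only [memD, List.any_eq_false, beq_iff_eq]
        intro w hw hweq
        have hwp : w = p := by apply String.ext; simpa using hweq
        exact hp (hwp ▸ hw)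
      cases hg : memo.get? (((p.toList.length : Nat) : Int), p) with
      | some b => exact ⟨hm _ p b hg, hm⟩
      | none =>
        apply loopA_correct d fuel p ih (by omega)
        · exact hm
        · rw [G_unfold, hmem, Bool.false_or]
          rw [Bool.eq_iff_iff]
          simp only [List.any_eq_true]
          constructor
          · rintro ⟨x, hx, hfx⟩
            exact ⟨x, (mem_getOptionsA d p x).mp hx, hfx⟩
          · rintro ⟨x, hx, hfx⟩
            exact ⟨x, (mem_getOptionsA d p x).mpr hx, hfx⟩

-- characterisation of one group built by the grouping pass
def filtB (d : List String) (i : Nat) (c : Char) : List String :=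
  d.filter (fun w => decide (i < w.toList.length) && (w.toList.getD i ' ' == c))

lemma groupsB_get? (i : Nat) (c : Char) :
    ∀ (ws : List String) (acc : PySem.Dict Char (List String)),
      (ws.foldl (groupStepB i) acc).get? c =
        if filtB ws i c = [] then acc.get? c
        else some ((acc.get? c).getD [] ++ filtB ws i c) := by
  intro ws
  induction ws with
  | nil => intro acc; simp [filtB]
  | cons w ws ih =>
    intro acc
    rw [List.foldl_cons, ih]
    by_cases hi : i < w.toList.length
    · by_cases hc : w.toList.getD i ' ' = c
      · have hstep : groupStepB i acc w = acc.insert c ((acc.get? c).getD [] ++ [w]) := by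
          unfold groupStepB
          rw [if_pos hi, hc, PySem.Dict.getD_eq_get?_getD]
        have hfilt : filtB (w :: ws) i c = w :: filtB ws i c := by
          unfold filtB
          rw [List.filter_cons_of_pos (by simp only [Bool.and_eq_true, decide_eq_true_eq, beq_iff_eq]; exact ⟨hi, hc⟩)]
        rw [hstep, hfilt, PySem.Dict.get?_insert]
        by_cases hnil : filtB ws i c = []
        · simp [hnil]
        · simp [hnil]
      · have hstep : groupStepB i acc w =
            acc.insert (w.toList.getD i ' ')
              ((acc.get? (w.toList.getD i ' ')).getD [] ++ [w]) := by
          unfold groupStepB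
          rw [if_pos hi, PySem.Dict.getD_eq_get?_getD]
        have hfilt : filtB (w :: ws) i c = filtB ws i c := by
          unfold filtB
          rw [List.filter_cons_of_neg (by simp only [Bool.and_eq_true, decide_eq_true_eq, beq_iff_eq]; rintro ⟨-, h⟩; exact hc h)]
        rw [hstep, hfilt, PySem.Dict.get?_insert,
          if_neg (show ¬c = w.toList.getD i ' ' from fun h => hc h.symm)]
    · have hstep : groupStepB i acc w = acc := by unfold groupStepB; rw [if_neg hi]
      have hfilt : filtB (w :: ws) i c = filtB ws i c := by
        unfold filtB
        rw [List.filter_cons_of_neg (by simp only [Bool.and_eq_true, decide_eq_true_eq]; rintro ⟨h, -⟩; exact hi h)]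
      rw [hstep, hfilt]

lemma groupsB_nodup_keys (i : Nat) :
    ∀ (ws : List String) (acc : PySem.Dict Char (List String)),
      acc.keys.Nodup → (ws.foldl (groupStepB i) acc).keys.Nodup := by
  intro ws
  induction ws with
  | nil => intro acc h; simpa
  | cons w ws ih =>
    intro acc h
    rw [List.foldl_cons]
    apply ih
    unfold groupStepB
    split
    · exact PySem.Dict.nodup_keys_insert _ _ _ h
    · exact h

-- take (i+1) w = p ++ [c]  ⟺  take i w = p ∧ i < |w| ∧ w[i] = c   (when |p| = i)
lemma take_succ_eq_append (w p : List Char) (c : Char) (hp : p.length = i) :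
    w.take (i + 1) = p ++ [c] ↔ w.take i = p ∧ i < w.length ∧ w.getD i ' ' = c := by
  by_cases hi : i < w.length
  · rw [List.take_add_one, List.getElem?_eq_getElem hi]
    simp only [Option.toList_some]
    constructor
    · intro h
      have hlen : (w.take i).length = p.length := by
        simp only [List.length_take]
        omega
      obtain ⟨h1, h2⟩ := List.append_inj h hlen
      refine ⟨h1, hi, ?_⟩
      have hcc : w[i] = c := by simpa using h2
      rw [List.getD_eq_getElem?_getD, List.getElem?_eq_getElem hi]
      simpa using hcc
    · rintro ⟨h1, -, h3⟩
      rw [List.getD_eq_getElem?_getD, List.getElem?_eq_getElem hi] at h3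
      simp only [Option.getD_some] at h3
      rw [h1, h3]
  · have h1 : w.take (i + 1) = w := List.take_of_length_le (by omega)
    have h2 : w.take i = w := List.take_of_length_le (by omega)
    rw [h1, h2]
    constructor
    · intro h
      exfalso
      have := congrArg List.length h
      simp only [List.length_append, List.length_cons, List.length_nil] at this
      omega
    · rintro ⟨-, hlt, -⟩
      exact absurd hlt hi

lemma winB_correct (d : List String) :
    ∀ (fuel : Nat) (p : List Char), maxWordLenS d + 1 ≤ fuel + p.length →
      winB fuel (d.filter (fun w => w.toList.take p.length == p)) p.length = G d p := by
  intro fuel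
  induction fuel with
  | zero =>
    intro p hlen
    simp only [winB]
    exact (G_long d p (by omega)).symm
  | succ fuel ih =>
    intro p hlen
    have hfilt2 : ∀ c : Char,
        filtB (d.filter (fun w => w.toList.take p.length == p)) p.length c =
          d.filter (fun w => w.toList.take (p.length + 1) == p ++ [c]) := by
      intro c
      unfold filtB
      rw [List.filter_filter]
      apply List.filter_congr
      intro w _
      rw [Bool.eq_iff_iff]
      simp only [Bool.and_eq_true, decide_eq_true_eq, beq_iff_eq]
      rw [take_succ_eq_append w.toList p c rfl]
      tauto
    have hih : ∀ c : Char,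
        winB fuel (d.filter (fun w => w.toList.take (p.length + 1) == p ++ [c])) (p.length + 1) =
          G d (p ++ [c]) := by
      intro c
      have hlc : (p ++ [c]).length = p.length + 1 := by simp
      have := ih (p ++ [c]) (by rw [hlc]; omega)
      simp only [hlc] at this
      exact this
    have hdeep : ∀ c : Char,
        ((d.filter (fun w => w.toList.take (p.length + 1) == p ++ [c])).any
          (fun w => p.length + 1 < w.toList.length) = true) ↔ c ∈ optsD d p := by
      intro c
      rw [mem_optsD]
      simp only [List.any_eq_true, List.mem_filter, beq_iff_eq, decide_eq_true_eq]
      constructor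
      · rintro ⟨w, ⟨hw, htake⟩, hlt⟩
        have h1 : p.length < w.toList.length := by omega
        obtain ⟨ht, -, hg⟩ := (take_succ_eq_append w.toList p c rfl).mp htake
        refine ⟨w, hw, hlt, ht, ?_⟩
        rw [List.getD_eq_getElem?_getD, List.getElem?_eq_getElem h1] at hg
        rw [List.getElem?_eq_getElem h1]
        simpa using hg
      · rintro ⟨w, hw, h1, h2, h3⟩
        have hl : p.length < w.toList.length := by omega
        refine ⟨w, ⟨hw, ?_⟩, h1⟩
        rw [take_succ_eq_append w.toList p c rfl]
        refine ⟨h2, hl, ?_⟩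
        rw [List.getD_eq_getElem?_getD, h3]
        rfl
    cases hmem : memD d p with
    | true =>
      have hif : (d.filter (fun w => w.toList.take p.length == p)).any
          (fun w => w.toList.length == p.length) = true := by
        simp only [memD, List.any_eq_true, beq_iff_eq] at hmem
        obtain ⟨w, hw, hweq⟩ := hmem
        simp only [List.any_eq_true, List.mem_filter, beq_iff_eq]
        exact ⟨w, ⟨hw, by rw [hweq]; simp⟩, by rw [hweq]⟩
      simp only [winB, hif, if_true]
      rw [G_unfold, hmem]
      simp
    | false =>
      have hif : (d.filter (fun w => w.toList.take p.length == p)).any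
          (fun w => w.toList.length == p.length) = false := by
        simp only [List.any_eq_false, List.mem_filter, beq_iff_eq]
        rintro w ⟨hw, htake⟩ hlen'
        have hwp : w.toList = p := by
          rw [← htake, List.take_of_length_le (by omega)]
        simp only [memD, List.any_eq_false, beq_iff_eq] at hmem
        exact hmem w hw hwp
      simp only [winB, hif, Bool.false_eq_true, if_false]
      rw [G_unfold, hmem, Bool.false_or]
      have hnodup : ((d.filter (fun w => w.toList.take p.length == p)).foldl
          (groupStepB p.length) PySem.Dict.empty).keys.Nodup :=
        groupsB_nodup_keys p.length _ PySem.Dict.empty (by simp [PySem.Dict.keys_empty])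
      rw [PySem.Dict.values_eq_map_keys _ hnodup [], List.any_map]
      rw [Bool.eq_iff_iff]
      simp only [List.any_eq_true]
      constructor
      · rintro ⟨k, hk, hF⟩
        have hget := groupsB_get? p.length k (d.filter (fun w => w.toList.take p.length == p))
          PySem.Dict.empty
        rw [PySem.Dict.get?_empty] at hget
        have hne : ¬ (filtB (d.filter (fun w => w.toList.take p.length == p)) p.length k = []) := by
          intro hnil
          rw [if_pos hnil] at hget
          rw [PySem.Dict.get?_eq_none_iff_not_mem_keys] at hget
          exact hget hk
        rw [if_neg hne] at hget
        simp only [Option.getD_none, List.nil_append] at hget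
        simp only [Function.comp_apply] at hF
        rw [PySem.Dict.getD_eq_get?_getD, hget] at hF
        simp only [Option.getD_some] at hF
        rw [hfilt2 k] at hF
        rw [Bool.and_eq_true] at hF
        refine ⟨k, (hdeep k).mp hF.1, ?_⟩
        rw [hih k] at hF
        exact hF.2
      · rintro ⟨k, hk, hG⟩
        -- k is a playable character: its group is nonempty and its condition holds
        have hdeepk := (hdeep k).mpr hk
        have hne : ¬ (filtB (d.filter (fun w => w.toList.take p.length == p)) p.length k = []) := by
          rw [hfilt2 k]
          intro hnil
          rw [hnil] at hdeepk
          simp at hdeepk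
        have hget := groupsB_get? p.length k (d.filter (fun w => w.toList.take p.length == p))
          PySem.Dict.empty
        rw [PySem.Dict.get?_empty, if_neg hne] at hget
        simp only [Option.getD_none, List.nil_append] at hget
        refine ⟨k, ?_, ?_⟩
        · have : ((d.filter (fun w => w.toList.take p.length == p)).foldl
              (groupStepB p.length) PySem.Dict.empty).get? k ≠ none := by
            rw [hget]; exact Option.some_ne_none _
          rw [Ne, PySem.Dict.get?_eq_none_iff_not_mem_keys, not_not] at this
          exact this
        · simp only [Function.comp_apply]
          rw [PySem.Dict.getD_eq_get?_getD, hget]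
          simp only [Option.getD_some]
          rw [hfilt2 k, Bool.and_eq_true]
          exact ⟨hdeepk, by rw [hih k, hG]⟩

-- ===== VERDICT (by name: the statement is the Claim_ definition above) =====
theorem hrt_dp_spec : Claim_equal_hrt_dp := by
  intro d cp _hdom hpre
  unfold Spec_hrt_dp hrt_dp hrt_dp_alt
  have hG : G d [] = true := hpre
  have hA := (canWinA_correct d (maxWordLenA d + 1) "" PySem.Dict.empty
      (by intro i p b hb; rw [PySem.Dict.get?_empty] at hb; cases hb)
      (by rw [show maxWordLenA d = maxWordLenS d from rfl]; omega)).1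
  simp only [show ("" : String).toList = [] from rfl, List.length_nil, Nat.cast_zero] at hA
  have hB := winB_correct d (maxWordLenB d + 1) []
      (by rw [show maxWordLenB d = maxWordLenS d from rfl]; omega)
  simp only [List.length_nil, List.take_zero] at hB
  rw [List.filter_eq_self.mpr (fun w _ => by simp)] at hB
  rw [hA, hB, hG]
  rfl
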